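-- pv_equiv track=rewrite | github.com/quanyeomans/agentic-context-mesh | kairix/benchmark/runner.py | _path_in_set
-- ===== SOURCE A (Python) =====
-- def _path_in_set(path: str, gold_set: set[str]) -> bool:
--     """True if path matches any gold entry via exact or suffix match."""
--     p = path.lower().replace("\\", "/")
--     if p in gold_set:
--         return True
--     parts = p.split("/")
--     for n in range(1, len(parts)):
--         if "/".join(parts[n:]) in gold_set:
--             return True
--     return False
-- ===== SOURCE B (Python) =====
-- def _path_in_set(path: str, gold_set: set[str]) -> bool:
--     """True if path matches any gold entry via exact or suffix match."""
--     p = path.lower().replace("\\", "/")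
--     return any(p == g or p.endswith("/" + g) for g in gold_set)
-- ===== Notes on version B (the rewrite author's own statement) =====
-- stated objective: simpler
-- what changed: Instead of generating every '/'-boundary suffix of the path and hashing each into the set, B scans the gold entries once and tests each with an exact match or endswith('/' + g), which enforces the same component boundary.
import Mathlib
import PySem

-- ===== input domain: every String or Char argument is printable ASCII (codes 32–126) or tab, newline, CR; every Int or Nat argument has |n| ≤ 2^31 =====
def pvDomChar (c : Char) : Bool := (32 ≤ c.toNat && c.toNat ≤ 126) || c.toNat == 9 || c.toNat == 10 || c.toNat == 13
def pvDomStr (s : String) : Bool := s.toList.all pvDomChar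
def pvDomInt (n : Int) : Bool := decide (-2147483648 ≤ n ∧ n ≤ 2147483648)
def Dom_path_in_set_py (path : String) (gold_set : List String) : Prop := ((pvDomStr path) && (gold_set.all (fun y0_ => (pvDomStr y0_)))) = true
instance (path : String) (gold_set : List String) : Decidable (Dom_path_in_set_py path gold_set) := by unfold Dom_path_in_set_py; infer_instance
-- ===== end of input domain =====

-- B replaces A's per-suffix generation ("/".join(parts[n:]) for every split point, each hashed into the set)
-- by one scan of the gold entries testing `p == g or p.endswith("/" + g)`; objective: simpler.

-- ===== PORT A =====
def path_in_set_py (path : String) (gold_set : List String) : Bool :=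
  let p := PySem.Str.replace (PySem.Str.lower path) "\\" "/"
  if PySem.Set.contains gold_set p then true
  else
    -- p.split("/"): sep is the nonempty literal "/", so split? is always `some`; getD never falls back
    let parts := (PySem.Str.split? p "/").getD []
    (PySem.List.pyRange 1 (parts.length : Int) 1).any (fun n =>
      PySem.Set.contains gold_set (PySem.Str.join "/" (PySem.List.slice parts (some n))))

-- ===== PORT B =====
def path_in_set_py_alt (path : String) (gold_set : List String) : Bool :=
  let p := PySem.Str.replace (PySem.Str.lower path) "\\" "/"
  gold_set.any (fun g => p == g || PySem.Str.endswith p ("/" ++ g))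

-- ===== PRECONDITION & SPEC =====
def Spec_path_in_set_py (path : String) (gold_set : List String) (out : Bool) : Prop := out = path_in_set_py_alt path gold_set
instance (path : String) (gold_set : List String) (out : Bool) : Decidable (Spec_path_in_set_py path gold_set out) := by unfold Spec_path_in_set_py; infer_instance

-- ===== CLAIM (what is proved, stated in full; the proofs are below) =====
def Claim_equal_path_in_set_py : Prop := ∀ (path : String) (gold_set : List String), Dom_path_in_set_py path gold_set → Spec_path_in_set_py path gold_set (path_in_set_py path gold_set)

-- ===== LEMMAS AND PROOFS =====

theorem pv_modifyHead_id (P : List (List Char)) : P.modifyHead (fun x => x) = P := by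
  cases P <;> simp

-- PySem's fuel-driven splitOn.go, specialised to the one-character separator "/", is Mathlib's splitOnP
theorem pv_go_spec (fuel : Nat) (l cur : List Char) (acc : List (List Char))
    (h : l.length < fuel) :
    PySem.Chars.splitOn.go ['/'] fuel l cur acc
      = acc.reverse ++ (List.splitOnP (· == '/') l).modifyHead (cur.reverse ++ ·) := by
  induction fuel generalizing l cur acc with
  | zero => omega
  | succ fuel ih =>
    cases l with
    | nil => simp [PySem.Chars.splitOn.go, List.splitOnP_nil]
    | cons c rest =>
      by_cases hc : c = '/'
      · subst hc
        have : List.isPrefixOf ['/'] ('/' :: rest) = true := by simp [List.isPrefixOf]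
        rw [PySem.Chars.splitOn.go]
        simp only [this, if_pos]
        rw [List.length_cons] at h
        rw [show List.drop (['/'] : List Char).length ('/' :: rest) = rest by simp,
            ih rest [] (cur.reverse :: acc) (by omega)]
        simp [List.splitOnP_cons, pv_modifyHead_id]
      · have : List.isPrefixOf ['/'] (c :: rest) = false := by
          simp [List.isPrefixOf]; exact fun h => absurd h.symm hc
        rw [PySem.Chars.splitOn.go]
        simp only [this, Bool.false_eq_true, if_neg, not_false_iff]
        rw [List.length_cons] at h
        rw [ih rest (c :: cur) acc (by omega)]
        have hne := List.splitOnP_ne_nil (· == '/') rest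
        obtain ⟨h0, t, hP⟩ : ∃ h0 t, List.splitOnP (· == '/') rest = h0 :: t := by
          cases hE : List.splitOnP (· == '/') rest with
          | nil => exact absurd hE hne
          | cons a b => exact ⟨a, b, rfl⟩
        simp [List.splitOnP_cons, hc, hP]
theorem pv_splitOn_eq (cs : List Char) :
    PySem.Chars.splitOn cs ['/'] = List.splitOnP (· == '/') cs := by
  rw [PySem.Chars.splitOn, pv_go_spec (cs.length + 1) cs [] [] (by omega)]
  simp [pv_modifyHead_id]

theorem pv_drop_modifyHead {f : List Char → List Char} (P : List (List Char)) (n : Nat)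
    (hn : 1 ≤ n) : (P.modifyHead f).drop n = P.drop n := by
  cases P with
  | nil => simp
  | cons h t =>
    obtain ⟨m, rfl⟩ : ∃ m, n = m + 1 := ⟨n - 1, by omega⟩
    simp

-- the heart: '/'-prefixed suffixes of cs are exactly the joins of the tails of its split
theorem pv_key (cs g : List Char) :
    ('/' :: g) <:+ cs ↔ ∃ n : Nat, 1 ≤ n ∧ n < (List.splitOnP (· == '/') cs).length ∧
      List.intercalate ['/'] ((List.splitOnP (· == '/') cs).drop n) = g := by
  induction cs generalizing g with
  | nil =>
    simp [List.suffix_nil, List.splitOnP_nil]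
  | cons c rest ih =>
    rw [List.suffix_cons_iff]
    have hPne := List.splitOnP_ne_nil (· == '/') rest
    by_cases hc : c = '/'
    · subst hc
      rw [show List.splitOnP (· == '/') ('/' :: rest) = [] :: List.splitOnP (· == '/') rest by
        simp [List.splitOnP_cons]]
      constructor
      · rintro (h | h)
        · refine ⟨1, le_refl _, ?_, ?_⟩
          · simpa using List.length_pos_iff.mpr hPne
          · injection h with _ h2
            simpa [h2] using List.intercalate_splitOn rest '/'
        · obtain ⟨n, h1, h2, h3⟩ := (ih g).mp h
          exact ⟨n + 1, by omega, by simpa using by omega, by simpa using h3⟩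
      · rintro ⟨n, h1, h2, h3⟩
        obtain ⟨m, rfl⟩ : ∃ m, n = m + 1 := ⟨n - 1, by omega⟩
        rcases Nat.eq_zero_or_pos m with hm | hm
        · subst hm
          left
          simp only [List.drop_succ_cons, List.drop_zero] at h3
          rw [show List.intercalate ['/'] (List.splitOnP (· == '/') rest) = rest from
            List.intercalate_splitOn rest '/'] at h3
          rw [h3]
        · right
          exact (ih g).mpr ⟨m, hm, by simp at h2; omega, by simpa using h3⟩
    · rw [show List.splitOnP (· == '/') (c :: rest)
          = (List.splitOnP (· == '/') rest).modifyHead (c :: ·) by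
        simp [List.splitOnP_cons, hc]]
      have hlen : ((List.splitOnP (· == '/') rest).modifyHead (c :: ·)).length
          = (List.splitOnP (· == '/') rest).length := List.length_modifyHead
      constructor
      · rintro (h | h)
        · exact absurd (by injection h with h1 _; exact h1.symm) hc
        · obtain ⟨n, h1, h2, h3⟩ := (ih g).mp h
          exact ⟨n, h1, by omega, by rw [pv_drop_modifyHead _ n h1]; exact h3⟩
      · rintro ⟨n, h1, h2, h3⟩
        rw [pv_drop_modifyHead _ n h1] at h3
        exact Or.inr ((ih g).mpr ⟨n, h1, by omega, h3⟩)

-- parts (A's split result) seen on the char-list side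
theorem pv_parts_eq (p : String) :
    (PySem.Str.split? p "/").getD []
      = (List.splitOnP (· == '/') p.toList).map String.ofList := by
  rw [PySem.Str.split?]
  have : PySem.Chars.split? p.toList ("/" : String).toList
      = some (List.splitOnP (· == '/') p.toList) := by
    rw [PySem.Chars.split?]
    simp [show ("/" : String).toList = ['/'] from rfl, pv_splitOn_eq]
  rw [this]
  simp

theorem path_in_set_py_eq (path : String) (gold_set : List String) :
    path_in_set_py path gold_set = path_in_set_py_alt path gold_set := by
  rw [path_in_set_py, path_in_set_py_alt]
  set p := PySem.Str.replace (PySem.Str.lower path) "\\" "/" with hp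
  rw [Bool.eq_iff_iff]
  simp only [pv_parts_eq, List.length_map]
  constructor
  · intro h
    split_ifs at h with hmem
    · -- exact match
      rw [List.any_eq_true]
      exact ⟨p, (PySem.Set.contains_iff gold_set p).mp hmem, by simp⟩
    · rw [List.any_eq_true] at h
      obtain ⟨n, hn, hg⟩ := h
      rw [PySem.List.mem_pyRange_one] at hn
      set g := PySem.Str.join "/" (PySem.List.slice ((List.splitOnP (· == '/') p.toList).map String.ofList) (some n)) with hgdef
      rw [PySem.Set.contains_iff] at hg
      rw [List.any_eq_true]
      refine ⟨g, hg, ?_⟩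
      have hsuf : ('/' :: g.toList) <:+ p.toList := by
        rw [pv_key]
        refine ⟨n.toNat, by omega, by omega, ?_⟩
        rw [hgdef, PySem.List.slice_from _ (by omega : (0:Int) ≤ n)]
        rw [show PySem.Str.join "/" (List.drop n.toNat ((List.splitOnP (· == '/') p.toList).map String.ofList))
              = String.ofList (PySem.Chars.join ['/']
                  ((List.drop n.toNat ((List.splitOnP (· == '/') p.toList).map String.ofList)).map String.toList)) from rfl]
        simp [PySem.Chars.join, ← List.map_drop, List.map_map, Function.comp_def,
          String.toList_ofList]
      rw [Bool.or_eq_true]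
      right
      rw [PySem.Str.endswith_eq]
      rw [show (("/" : String) ++ g).toList = '/' :: g.toList by
        rw [String.toList_append]; rfl]
      exact (PySem.Chars.endswith_iff _ _).mpr hsuf
  · intro h
    rw [List.any_eq_true] at h
    obtain ⟨g, hgmem, hg⟩ := h
    rw [Bool.or_eq_true, beq_iff_eq] at hg
    rcases hg with hg | hg
    · rw [if_pos ((PySem.Set.contains_iff gold_set p).mpr (hg ▸ hgmem))]
    · -- suffix match: find the split point n
      rw [PySem.Str.endswith_eq] at hg
      rw [show (("/" : String) ++ g).toList = '/' :: g.toList by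
        rw [String.toList_append]; rfl] at hg
      have hsuf := (PySem.Chars.endswith_iff _ _).mp hg
      rw [pv_key] at hsuf
      obtain ⟨n, h1, h2, h3⟩ := hsuf
      split_ifs with hmem
      · rfl
      · rw [List.any_eq_true]
        refine ⟨(n : Int), by rw [PySem.List.mem_pyRange_one]; omega, ?_⟩
        rw [PySem.Set.contains_iff]
        have : PySem.Str.join "/" (PySem.List.slice ((List.splitOnP (· == '/') p.toList).map String.ofList) (some (n : Int))) = g := by
          rw [PySem.List.slice_from _ (by omega : (0:Int) ≤ (n : Int))]
          rw [← String.toList_inj]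
          rw [show PySem.Str.join "/" (List.drop ((n : Int)).toNat ((List.splitOnP (· == '/') p.toList).map String.ofList))
                = String.ofList (PySem.Chars.join ['/']
                    ((List.drop ((n : Int)).toNat ((List.splitOnP (· == '/') p.toList).map String.ofList)).map String.toList)) from rfl]
          simp only [String.toList_ofList, Int.toNat_natCast]
          rw [← h3]
          simp [PySem.Chars.join, ← List.map_drop, List.map_map, Function.comp_def,
            String.toList_ofList]
        rw [this]
        exact hgmem

-- ===== VERDICT (by name: the statement is the Claim_ definition above) =====
theorem path_in_set_py_spec : Claim_equal_path_in_set_py := by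
  intro path gold_set _
  unfold Spec_path_in_set_py
  exact path_in_set_py_eq path gold_set
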